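-- pv_equiv track=rewrite | github.com/pypi-data/pypi-mirror-329 | packages/ksaa/ksaa-2025.2.23.0.tar.gz/ksaa-2025.2.23.0/kotonebot/tasks/produce.py | unify
-- ===== SOURCE A (Python) =====
-- def unify(arr: list[int]):
--     # 先对数组进行排序
--     arr.sort()
--     result = []
--     i = 0
--     while i < len(arr):
--         # 将当前元素加入结果
--         result.append(arr[i])
--         # 跳过所有与当前元素相似的元素
--         j = i + 1
--         while j < len(arr) and abs(arr[j] - arr[i]) <= 10:
--             j += 1
--         i = j
--     return result
-- ===== SOURCE B (Python) =====
-- def unify(arr: list[int]):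
--     arr.sort()
--     result = []
--     i = 0
--     n = len(arr)
--     while i < n:
--         x = arr[i]
--         result.append(x)
--         # binary search for the first index > i whose value exceeds x + 10
--         lo, hi = i + 1, n
--         while lo < hi:
--             mid = (lo + hi) // 2
--             if arr[mid] <= x + 10:
--                 lo = mid + 1
--             else:
--                 hi = mid
--         i = lo
--     return result
-- ===== Notes on version B (the rewrite author's own statement) =====
-- stated objective: alternative
-- what changed: Replaces A's linear inner skip-while over similar elements by a binary search (bisect-style) that jumps directly to the first element more than 10 above the current representative; correct because after the sort the kept/skipped split is a monotone predicate.
import Mathlib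
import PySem

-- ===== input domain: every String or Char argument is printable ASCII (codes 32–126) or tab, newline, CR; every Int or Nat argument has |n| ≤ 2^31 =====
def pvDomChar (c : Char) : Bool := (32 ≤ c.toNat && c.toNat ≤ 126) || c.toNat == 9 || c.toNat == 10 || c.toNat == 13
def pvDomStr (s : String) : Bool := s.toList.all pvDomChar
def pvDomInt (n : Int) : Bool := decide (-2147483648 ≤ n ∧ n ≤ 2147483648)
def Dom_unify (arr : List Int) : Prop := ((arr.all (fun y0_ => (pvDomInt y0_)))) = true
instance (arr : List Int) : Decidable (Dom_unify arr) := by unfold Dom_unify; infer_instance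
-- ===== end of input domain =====

-- B replaces A's linear inner skip-while by a binary search jumping to the first element
-- more than 10 above the current representative (objective: alternative algorithm).
-- Both A and B sort the argument in place; the equivalence proved is about the return value.


-- ===== PORT A =====
-- inner while: j += 1 while j < len(arr) and abs(arr[j] - arr[i]) <= 10
def unifySkip (s : List Int) (x : Int) (j : Nat) : Nat :=
  if h : j < s.length then
    if |s[j]'h - x| ≤ 10 then unifySkip s x (j + 1) else j
  else j
termination_by s.length - j

theorem unifySkip_ge (s : List Int) (x : Int) (j : Nat) : j ≤ unifySkip s x j := by
  unfold unifySkip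
  split
  · split
    · exact Nat.le_trans (Nat.le_succ j) (unifySkip_ge s x (j + 1))
    · exact Nat.le_refl j
  · exact Nat.le_refl j
termination_by s.length - j

-- outer while over index i, appending arr[i] then jumping to j
def unifyLoop (s : List Int) (i : Nat) (result : List Int) : List Int :=
  if h : i < s.length then
    unifyLoop s (unifySkip s (s[i]'h) (i + 1)) (result ++ [s[i]'h])
  else result
termination_by s.length - i
decreasing_by
  have := unifySkip_ge s (s[i]'h) (i + 1)
  omega

def unify (arr : List Int) : List Int :=
  let s := PySem.List.sorted arr (fun x => x) false
  unifyLoop s 0 []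

-- ===== PORT B =====
-- inner while: binary search for the first index in [lo, hi) with arr[idx] > b;
-- the while loop is made total with fuel = hi - lo (each step strictly shrinks [lo, hi))
def bsearchF (s : List Int) (b : Int) (lo hi fuel : Nat) : Nat :=
  match fuel with
  | 0 => lo
  | fuel + 1 =>
    if lo < hi then
      if s.getD ((lo + hi) / 2) 0 ≤ b then bsearchF s b ((lo + hi) / 2 + 1) hi fuel
      else bsearchF s b lo ((lo + hi) / 2) fuel
    else lo

def bsearch (s : List Int) (b : Int) (lo hi : Nat) : Nat := bsearchF s b lo hi (hi - lo)

theorem bsearchF_ge (s : List Int) (b : Int) (fuel : Nat) :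
    ∀ lo hi, lo ≤ bsearchF s b lo hi fuel := by
  induction fuel with
  | zero => intro lo hi; exact Nat.le_refl lo
  | succ n ih =>
    intro lo hi
    show lo ≤ (if lo < hi then
      if s.getD ((lo + hi) / 2) 0 ≤ b then bsearchF s b ((lo + hi) / 2 + 1) hi n
      else bsearchF s b lo ((lo + hi) / 2) n else lo)
    split
    · split
      · exact Nat.le_trans (by omega) (ih ((lo + hi) / 2 + 1) hi)
      · exact ih lo ((lo + hi) / 2)
    · exact Nat.le_refl lo

theorem bsearch_ge (s : List Int) (b : Int) (lo hi : Nat) : lo ≤ bsearch s b lo hi :=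
  bsearchF_ge s b (hi - lo) lo hi

-- outer while: append arr[i], then i := bsearch result
def unifyAltLoop (s : List Int) (i : Nat) (result : List Int) : List Int :=
  if h : i < s.length then
    unifyAltLoop s (bsearch s (s[i]'h + 10) (i + 1) s.length) (result ++ [s[i]'h])
  else result
termination_by s.length - i
decreasing_by
  have := bsearch_ge s (s[i]'h + 10) (i + 1) s.length
  omega

def unify_alt (arr : List Int) : List Int :=
  let s := PySem.List.sorted arr (fun x => x) false
  unifyAltLoop s 0 []

-- ===== PRECONDITION & SPEC =====
def Spec_unify (arr : List Int) (out : List Int) : Prop := out = unify_alt arr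
instance (arr : List Int) (out : List Int) : Decidable (Spec_unify arr out) := by unfold Spec_unify; infer_instance

-- ===== CLAIM (what is proved, stated in full; the proofs are below) =====
def Claim_equal_unify : Prop := ∀ (arr : List Int), Dom_unify arr → Spec_unify arr (unify arr)

-- ===== LEMMAS AND PROOFS =====

-- common greedy spec: keep head, drop all within 10 of it, recurse
def greedyA : List Int → List Int
  | [] => []
  | x :: xs => x :: greedyA (xs.dropWhile (fun y => decide (|y - x| ≤ 10)))
termination_by l => l.length
decreasing_by
  have := List.length_dropWhile_le (fun y => decide (|y - x| ≤ 10)) xs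
  simp; omega

-- ---- A side: the linear skip computes the dropWhile split ----
theorem unifySkip_drop (s : List Int) (x : Int) (j : Nat) :
    s.drop (unifySkip s x j) = (s.drop j).dropWhile (fun y => decide (|y - x| ≤ 10)) := by
  unfold unifySkip
  split
  · rename_i h
    have hd : s.drop j = s[j]'h :: s.drop (j + 1) := List.drop_eq_getElem_cons h
    split
    · rename_i habs
      rw [unifySkip_drop s x (j + 1), hd, List.dropWhile_cons_of_pos (by simpa using habs)]
    · rename_i habs
      rw [hd, List.dropWhile_cons_of_neg (by simpa using habs)]
  · rename_i h
    rw [List.drop_eq_nil_of_le (by omega)]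
    simp
termination_by s.length - j

theorem unifyLoop_eq_greedyA (s : List Int) (i : Nat) (acc : List Int) :
    unifyLoop s i acc = acc ++ greedyA (s.drop i) := by
  unfold unifyLoop
  split
  · rename_i h
    have hge := unifySkip_ge s (s[i]'h) (i + 1)
    rw [unifyLoop_eq_greedyA]
    rw [unifySkip_drop]
    conv_rhs => rw [List.drop_eq_getElem_cons h]
    rw [greedyA]
    simp
  · rename_i h
    rw [List.drop_eq_nil_of_le (by omega), greedyA]
    simp
termination_by s.length - i
decreasing_by omega

-- ---- B side: the binary search computes the same split on a sorted list ----
-- sortedness gives index monotonicity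
theorem sorted_get_mono (s : List Int) (hp : s.Pairwise (· ≤ ·)) {k k' : Nat}
    (hk' : k' < s.length) (hkk : k ≤ k') : s[k]'(by omega) ≤ s[k']'hk' := by
  rcases Nat.eq_or_lt_of_le hkk with h | h
  · subst h; exact le_refl _
  · exact (List.pairwise_iff_getElem.mp hp) k k' (by omega) hk' h

-- the binary search finds the split point of the monotone predicate (· ≤ b)
theorem bsearchF_spec (s : List Int) (hp : s.Pairwise (· ≤ ·)) (b : Int) (fuel : Nat) :
    ∀ lo hi (hlohi : lo ≤ hi) (hhi : hi ≤ s.length) (hfuel : hi - lo ≤ fuel),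
    lo ≤ bsearchF s b lo hi fuel ∧ bsearchF s b lo hi fuel ≤ hi ∧
    (∀ k (hk : k < s.length), lo ≤ k → k < bsearchF s b lo hi fuel → s[k]'hk ≤ b) ∧
    (∀ (hr : bsearchF s b lo hi fuel < hi), b < s[bsearchF s b lo hi fuel]'(by omega)) := by
  induction fuel with
  | zero =>
    intro lo hi hlohi hhi hfuel
    have h : lo = hi := by omega
    simp only [bsearchF]
    exact ⟨Nat.le_refl lo, by omega, by omega, by omega⟩
  | succ n ih =>
    intro lo hi hlohi hhi hfuel
    simp only [bsearchF]
    by_cases hlt : lo < hi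
    · simp only [if_pos hlt]
      have hmid : (lo + hi) / 2 < hi := by omega
      have hmid' : (lo + hi) / 2 < s.length := by omega
      have hget : s.getD ((lo + hi) / 2) 0 = s[(lo + hi) / 2]'hmid' := List.getD_eq_getElem s 0 hmid'
      by_cases hle : s.getD ((lo + hi) / 2) 0 ≤ b
      · simp only [if_pos hle]
        rw [hget] at hle
        obtain ⟨h1, h2, h3, h4⟩ := ih ((lo + hi) / 2 + 1) hi (by omega) hhi (by omega)
        refine ⟨by omega, h2, ?_, h4⟩
        intro k hk hlok hkr
        by_cases hkm : (lo + hi) / 2 + 1 ≤ k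
        · exact h3 k hk hkm hkr
        · exact le_trans (sorted_get_mono s hp hmid' (by omega)) hle
      · simp only [if_neg hle]
        rw [hget] at hle
        obtain ⟨h1, h2, h3, h4⟩ := ih lo ((lo + hi) / 2) (by omega) (by omega) (by omega)
        refine ⟨h1, by omega, h3, ?_⟩
        intro hr
        rcases Nat.lt_or_ge (bsearchF s b lo ((lo + hi) / 2) n) ((lo + hi) / 2) with hc | hc
        · exact h4 hc
        · have hgt' : b < s[(lo + hi) / 2]'hmid' := lt_of_not_ge hle
          have hm : s[(lo + hi) / 2]'hmid' ≤ s[bsearchF s b lo ((lo + hi) / 2) n]'(by omega) :=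
            sorted_get_mono s hp (by omega) hc
          omega
    · simp only [if_neg hlt]
      exact ⟨Nat.le_refl lo, by omega, by omega, by omega⟩

theorem bsearch_spec (s : List Int) (hp : s.Pairwise (· ≤ ·)) (b : Int) (lo hi : Nat)
    (hlohi : lo ≤ hi) (hhi : hi ≤ s.length) :
    lo ≤ bsearch s b lo hi ∧ bsearch s b lo hi ≤ hi ∧
    (∀ k (hk : k < s.length), lo ≤ k → k < bsearch s b lo hi → s[k]'hk ≤ b) ∧
    (∀ (hr : bsearch s b lo hi < hi), b < s[bsearch s b lo hi]'(by omega)) :=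
  bsearchF_spec s hp b (hi - lo) lo hi hlohi hhi (Nat.le_refl _)

-- generic: a split point of a predicate realises drop/dropWhile
theorem drop_eq_dropWhile_aux (s : List Int) (p : Int → Bool) (n : Nat) :
    ∀ lo, lo + n ≤ s.length →
    (∀ k (hk : k < s.length), lo ≤ k → k < lo + n → p (s[k]'hk) = true) →
    (∀ k (hk : k < s.length), lo + n ≤ k → p (s[k]'hk) = false) →
    s.drop (lo + n) = (s.drop lo).dropWhile p := by
  induction n with
  | zero =>
    intro lo _ _ hpost
    by_cases h : lo < s.length
    · rw [Nat.add_zero, List.drop_eq_getElem_cons h, List.dropWhile_cons_of_neg]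
      rw [hpost lo h (by omega)]
      simp
    · rw [List.drop_eq_nil_of_le (by omega), List.drop_eq_nil_of_le (by omega)]
      simp
  | succ n ih =>
    intro lo hlen hpre hpost
    have h : lo < s.length := by omega
    rw [List.drop_eq_getElem_cons h, List.dropWhile_cons_of_pos (by
      exact hpre lo h (by omega) (by omega))]
    have := ih (lo + 1) (by omega)
      (fun k hk h1 h2 => hpre k hk (by omega) (by omega))
      (fun k hk h1 => hpost k hk (by omega))
    have he : lo + (n + 1) = lo + 1 + n := by omega
    rw [he, this]

theorem drop_eq_dropWhile_of_split (s : List Int) (p : Int → Bool) (lo r : Nat)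
    (hlor : lo ≤ r) (hr : r ≤ s.length)
    (hpre : ∀ k (hk : k < s.length), lo ≤ k → k < r → p (s[k]'hk) = true)
    (hpost : ∀ k (hk : k < s.length), r ≤ k → p (s[k]'hk) = false) :
    s.drop r = (s.drop lo).dropWhile p := by
  have h : r = lo + (r - lo) := by omega
  rw [h] at hpre hpost ⊢
  exact drop_eq_dropWhile_aux s p (r - lo) lo (by omega) hpre hpost

theorem drop_bsearch (s : List Int) (hp : s.Pairwise (· ≤ ·)) (i : Nat) (h : i < s.length) :
    s.drop (bsearch s (s[i]'h + 10) (i + 1) s.length)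
      = (s.drop (i + 1)).dropWhile (fun y => decide (|y - s[i]'h| ≤ 10)) := by
  obtain ⟨h1, h2, h3, h4⟩ := bsearch_spec s hp (s[i]'h + 10) (i + 1) s.length (by omega) (le_refl _)
  apply drop_eq_dropWhile_of_split s _ (i + 1) _ h1 h2
  · intro k hk hlok hkr
    have hxk : s[i]'h ≤ s[k]'hk := sorted_get_mono s hp hk (by omega)
    have h10 := h3 k hk hlok hkr
    simp only [decide_eq_true_eq]
    rw [abs_of_nonneg (by omega : (0:Int) ≤ s[k]'hk - s[i]'h)]
    omega
  · intro k hk hrk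
    have hb := h4 (by omega)
    have hmono := sorted_get_mono s hp hk hrk
    simp only [decide_eq_false_iff_not, not_le]
    rw [abs_of_nonneg (by omega : (0:Int) ≤ s[k]'hk - s[i]'h)]
    omega

theorem unifyAltLoop_eq_greedyA (s : List Int) (hp : s.Pairwise (· ≤ ·)) (i : Nat)
    (acc : List Int) : unifyAltLoop s i acc = acc ++ greedyA (s.drop i) := by
  unfold unifyAltLoop
  split
  · rename_i h
    have hge := bsearch_ge s (s[i]'h + 10) (i + 1) s.length
    rw [unifyAltLoop_eq_greedyA s hp]
    rw [drop_bsearch s hp i h]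
    conv_rhs => rw [List.drop_eq_getElem_cons h]
    rw [greedyA]
    simp
  · rename_i h
    rw [List.drop_eq_nil_of_le (by omega), greedyA]
    simp
termination_by s.length - i
decreasing_by omega

-- ===== VERDICT (by name: the statement is the Claim_ definition above) =====
theorem unify_spec : Claim_equal_unify := by
  intro arr _
  unfold Spec_unify unify unify_alt
  simp only
  have hp : (PySem.List.sorted arr (fun x => x) false).Pairwise (· ≤ ·) := by
    simpa using PySem.List.sorted_pairwise (xs := arr) (key := fun x : Int => x)
  rw [unifyLoop_eq_greedyA, unifyAltLoop_eq_greedyA _ hp]
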